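-- pv_equiv track=rewrite | github.com/Manish-CS25/fault-tolerant-distance-Oracle | max21.py | single_edge_in_path
-- ===== SOURCE A (Python) =====
-- class Edge:
--     def __init__(self, u, v, weight):
--         self.u = u
--         self.v = v
--         self.weight = weight
--
-- def single_edge_in_path(p, F2):
--     if p is not None:
--         p_edges = [(p[i], p[i + 1]) for i in range(len(p) - 1)]
--
--         for edge in F2:
--             # unpack edge into u and v
--             if isinstance(edge, Edge):
--                 u, v = edge.u, edge.v
--             else:
--                 u,v = edge
--             # check if the edge is in the path
--             if (u, v) in p_edges or (v, u) in p_edges: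
--                 return True
--         return False
-- ===== SOURCE B (Python) =====
-- class Edge:
--     def __init__(self, u, v, weight):
--         self.u = u
--         self.v = v
--         self.weight = weight
--
-- def single_edge_in_path(p, F2):
--     if p is not None:
--         f2_edges = set()
--         for edge in F2:
--             if isinstance(edge, Edge):
--                 u, v = edge.u, edge.v
--             else:
--                 u, v = edge
--             f2_edges.add((u, v))
--             f2_edges.add((v, u))
--         for pair in zip(p, p[1:]):
--             if pair in f2_edges:
--                 return True
--         return False
-- ===== Notes on version B (the rewrite author's own statement) =====
-- stated objective: faster
-- what changed: B preprocesses F2 into a set of both edge orientations and drives the loop over the path's consecutive pairs with O(1) set lookups, instead of A's loop over F2 with linear scans of a materialised path-edge list.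
import Mathlib
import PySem

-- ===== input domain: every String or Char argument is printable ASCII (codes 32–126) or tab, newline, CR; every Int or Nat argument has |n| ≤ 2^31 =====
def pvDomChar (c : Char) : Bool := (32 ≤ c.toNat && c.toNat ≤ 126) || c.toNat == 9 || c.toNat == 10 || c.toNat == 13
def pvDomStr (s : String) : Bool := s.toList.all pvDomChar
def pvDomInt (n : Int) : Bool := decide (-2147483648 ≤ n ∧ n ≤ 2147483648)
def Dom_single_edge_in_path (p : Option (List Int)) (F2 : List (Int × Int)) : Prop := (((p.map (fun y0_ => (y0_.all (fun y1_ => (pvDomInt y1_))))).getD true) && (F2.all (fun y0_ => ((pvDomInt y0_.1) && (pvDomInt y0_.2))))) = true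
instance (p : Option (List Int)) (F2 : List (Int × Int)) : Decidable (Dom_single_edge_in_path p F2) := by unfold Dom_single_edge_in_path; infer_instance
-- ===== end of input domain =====

-- B builds a set of both orientations of the F2 edges once and scans the path's
-- consecutive pairs with set lookups, instead of A's scan of F2 with linear
-- searches of a materialised path-edge list; faster by the measured check.


-- ===== PORT A =====
-- p_edges = [(p[i], p[i+1]) for i in range(len(p)-1)]; the indices i, i+1 are
-- always in range there, so the `.getD 0` totalisation of pyGet? is exact.
def pvEdgesA (l : List Int) : List (Int × Int) :=
  (PySem.List.pyRange 0 ((l.length : Int) - 1) 1).map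
    (fun i => ((PySem.List.pyGet? l i).getD 0, (PySem.List.pyGet? l (i + 1)).getD 0))

-- 'for edge in F2: … if (u,v) in p_edges or (v,u) in p_edges: return True' / 'return False'
def pvLoopA (pe : List (Int × Int)) : List (Int × Int) → Option Bool
  | [] => some false
  | (u, v) :: rest =>
      if pe.contains (u, v) || pe.contains (v, u) then some true else pvLoopA pe rest

def single_edge_in_path (p : Option (List Int)) (F2 : List (Int × Int)) : Option Bool :=
  match p with
  | none => none            -- falls off the function: implicit None
  | some l => pvLoopA (pvEdgesA l) F2

-- ===== PORT B =====
-- f2_edges = set(); for (u,v) in F2: add (u,v); add (v,u)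
def pvF2Set (F2 : List (Int × Int)) : PySem.Set (Int × Int) :=
  F2.foldl (fun s e => PySem.Set.add (PySem.Set.add s (e.1, e.2)) (e.2, e.1)) PySem.Set.empty

-- 'for pair in zip(p, p[1:]): if pair in f2_edges: return True' / 'return False'
def pvScanB (s : PySem.Set (Int × Int)) : List (Int × Int) → Bool
  | [] => false
  | pr :: rest => if s.contains pr then true else pvScanB s rest

def single_edge_in_path_alt (p : Option (List Int)) (F2 : List (Int × Int)) : Option Bool :=
  match p with
  | none => none
  | some l => some (pvScanB (pvF2Set F2) (l.zip (l.drop 1)))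

-- ===== PRECONDITION & SPEC =====
def Spec_single_edge_in_path (p : Option (List Int)) (F2 : List (Int × Int)) (out : Option Bool) : Prop := out = single_edge_in_path_alt p F2
instance (p : Option (List Int)) (F2 : List (Int × Int)) (out : Option Bool) : Decidable (Spec_single_edge_in_path p F2 out) := by unfold Spec_single_edge_in_path; infer_instance

-- ===== CLAIM (what is proved, stated in full; the proofs are below) =====
def Claim_equal_single_edge_in_path : Prop := ∀ (p : Option (List Int)) (F2 : List (Int × Int)), Dom_single_edge_in_path p F2 → Spec_single_edge_in_path p F2 (single_edge_in_path p F2)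

-- ===== LEMMAS AND PROOFS =====

-- A's comprehension builds exactly the consecutive pairs zip(p, p[1:]).
theorem pvEdgesA_eq_zip (l : List Int) : pvEdgesA l = l.zip (l.drop 1) := by
  unfold pvEdgesA
  apply List.ext_getElem
  · simp [PySem.List.length_pyRange_one]
  · intro k h1 h2
    simp only [List.getElem_map, PySem.List.getElem_pyRange_one, List.getElem_zip]
    have hk : k < l.length - 1 := by
      simpa [PySem.List.length_pyRange_one] using h1
    have h0 : ((0 : Int) + (k : Int)) = ((k : Nat) : Int) := by ring
    have h1' : ((k : Nat) : Int) + 1 = (((k + 1 : Nat)) : Int) := by push_cast; ring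
    rw [h0]
    simp only [h1', PySem.List.pyGet?_natCast]
    rw [List.getElem?_eq_getElem (by omega), List.getElem?_eq_getElem (by omega)]
    simp

-- A's loop over F2 as a Boolean 'any'.
theorem pvLoopA_eq_any (pe : List (Int × Int)) (F2 : List (Int × Int)) :
    pvLoopA pe F2 = some (F2.any (fun e => pe.contains (e.1, e.2) || pe.contains (e.2, e.1))) := by
  induction F2 with
  | nil => rfl
  | cons e rest ih =>
      obtain ⟨u, v⟩ := e
      simp only [pvLoopA, ih, List.any_cons]
      by_cases h1 : (u, v) ∈ pe <;> by_cases h2 : (v, u) ∈ pe <;> simp [h1, h2]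

-- B's scan as a Boolean 'any'.
theorem pvScanB_eq_any (s : PySem.Set (Int × Int)) (prs : List (Int × Int)) :
    pvScanB s prs = prs.any (fun pr => s.contains pr) := by
  induction prs with
  | nil => rfl
  | cons pr rest ih =>
      simp only [pvScanB, ih, List.any_cons]
      by_cases h : pr ∈ s <;> simp [h]

-- membership in the orientation set B builds from F2
theorem mem_pvF2Set (F2 : List (Int × Int)) (x : Int × Int) :
    x ∈ pvF2Set F2 ↔ ∃ e ∈ F2, x = (e.1, e.2) ∨ x = (e.2, e.1) := by
  unfold pvF2Set
  suffices h : ∀ (s : PySem.Set (Int × Int)),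
      x ∈ F2.foldl (fun s e => PySem.Set.add (PySem.Set.add s (e.1, e.2)) (e.2, e.1)) s ↔
      x ∈ s ∨ ∃ e ∈ F2, x = (e.1, e.2) ∨ x = (e.2, e.1) by
    simpa [PySem.Set.empty] using h PySem.Set.empty
  intro s
  induction F2 generalizing s with
  | nil => simp
  | cons e rest ih =>
      simp only [List.foldl_cons, ih, PySem.Set.mem_add, List.mem_cons]
      constructor
      · rintro (((h | rfl) | rfl) | ⟨f, hf, h⟩)
        · tauto
        · exact Or.inr ⟨e, Or.inl rfl, Or.inl rfl⟩
        · exact Or.inr ⟨e, Or.inl rfl, Or.inr rfl⟩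
        · exact Or.inr ⟨f, Or.inr hf, h⟩
      · rintro (h | ⟨f, (rfl | hf), h⟩)
        · exact Or.inl (Or.inl (Or.inl h))
        · rcases h with rfl | rfl
          · exact Or.inl (Or.inl (Or.inr rfl))
          · exact Or.inl (Or.inr rfl)
        · exact Or.inr ⟨f, hf, h⟩

theorem single_edge_core (l : List Int) (F2 : List (Int × Int)) :
    pvLoopA (pvEdgesA l) F2 = some (pvScanB (pvF2Set F2) (l.zip (l.drop 1))) := by
  rw [pvLoopA_eq_any, pvScanB_eq_any, pvEdgesA_eq_zip]
  congr 1
  rw [Bool.eq_iff_iff]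
  simp only [List.any_eq_true, Bool.or_eq_true, List.contains_iff_mem, PySem.Set.contains_iff, mem_pvF2Set]
  constructor
  · rintro ⟨e, he, (h | h)⟩
    · exact ⟨_, h, e, he, Or.inl rfl⟩
    · exact ⟨_, h, e, he, Or.inr rfl⟩
  · rintro ⟨pr, hpr, e, he, (rfl | rfl)⟩
    · exact ⟨e, he, Or.inl hpr⟩
    · exact ⟨e, he, Or.inr hpr⟩

-- ===== VERDICT (by name: the statement is the Claim_ definition above) =====
theorem single_edge_in_path_spec : Claim_equal_single_edge_in_path := by
  intro p F2 _
  unfold Spec_single_edge_in_path single_edge_in_path single_edge_in_path_alt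
  cases p with
  | none => rfl
  | some l => exact single_edge_core l F2
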